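-- pv_equiv track=rewrite | github.com/wandaoyi/insight_face_pro | utils/data_utils.py | generate_target_identity
-- ===== SOURCE A (Python) =====
-- def generate_target_identity(image_info_list):
--     """
--         生成目标身份 list
--     :param image_info_list:
--     :return:
--     """
--
--     image_identity_and_path = {}
--     for image_info in image_info_list:
--         image_path = image_info[1]
--         identity_index = image_info[2]
--         if identity_index not in image_identity_and_path:
--             image_identity_and_path.update({identity_index: [image_path]})
--             pass
--         else:
--             image_identity_and_path[identity_index].append(image_path)
--             pass
--         pass
--
--     identity_count_list = []
--     image_identity_and_path_key = [key_name for key_name in image_identity_and_path]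
--     image_identity_and_path_key.sort()
--     for key_name in image_identity_and_path_key:
--         identity_count_list.append(image_identity_and_path[key_name])
--         pass
--
--     return identity_count_list
--     pass
-- ===== SOURCE B (Python) =====
-- def generate_target_identity(image_info_list):
--     """Group image paths by identity index; groups ordered by ascending identity."""
--     keys = sorted({info[2] for info in image_info_list})
--     return [[info[1] for info in image_info_list if info[2] == k] for k in keys]
-- ===== Notes on version B (the rewrite author's own statement) =====
-- stated objective: simpler
-- what changed: Replaces the dict-accumulation loop plus key-sort plus lookup loop with a two-liner: sort the set of identity indices, then build each group by a filtering comprehension over the input.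
import Mathlib
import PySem

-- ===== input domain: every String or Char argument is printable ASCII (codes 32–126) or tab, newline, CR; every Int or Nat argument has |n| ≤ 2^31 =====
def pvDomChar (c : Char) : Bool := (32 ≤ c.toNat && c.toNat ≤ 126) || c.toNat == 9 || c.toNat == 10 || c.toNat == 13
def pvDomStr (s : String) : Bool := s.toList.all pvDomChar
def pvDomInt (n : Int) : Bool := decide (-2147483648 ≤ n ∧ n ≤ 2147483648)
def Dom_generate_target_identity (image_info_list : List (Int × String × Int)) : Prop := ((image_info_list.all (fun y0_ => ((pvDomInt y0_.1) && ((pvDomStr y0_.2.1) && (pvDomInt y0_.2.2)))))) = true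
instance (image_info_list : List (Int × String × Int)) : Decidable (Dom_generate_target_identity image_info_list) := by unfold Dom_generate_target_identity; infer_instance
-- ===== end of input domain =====

-- B replaces A's dict-accumulation loop + key sort + lookup loop by sorting the set of
-- identity indices and building each group with a filtering pass (simpler decomposition).

-- ===== PORT A =====
def generate_target_identity (image_info_list : List (Int × String × Int)) : List (List String) :=
  let image_identity_and_path : PySem.Dict Int (List String) :=
    image_info_list.foldl (fun d image_info =>
      let image_path := image_info.2.1
      let identity_index := image_info.2.2
      if d.contains identity_index = false then
        d.insert identity_index [image_path]
      else
        d.insert identity_index (d.getD identity_index [] ++ [image_path])) PySem.Dict.empty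
  let image_identity_and_path_key :=
    PySem.List.sorted image_identity_and_path.keys (fun x => x) false
  image_identity_and_path_key.foldl
    (fun identity_count_list key_name =>
      identity_count_list ++ [image_identity_and_path.getD key_name []]) []

-- ===== PORT B =====
def generate_target_identity_alt (image_info_list : List (Int × String × Int)) : List (List String) :=
  let keys := PySem.List.sorted
    (PySem.Set.ofList (image_info_list.map (fun info => info.2.2))) (fun x => x) false
  keys.map (fun k =>
    (image_info_list.filter (fun info => info.2.2 == k)).map (fun info => info.2.1))

-- ===== PRECONDITION & SPEC =====
def Spec_generate_target_identity (image_info_list : List (Int × String × Int)) (out : List (List String)) : Prop := out = generate_target_identity_alt image_info_list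
instance (image_info_list : List (Int × String × Int)) (out : List (List String)) : Decidable (Spec_generate_target_identity image_info_list out) := by unfold Spec_generate_target_identity; infer_instance

-- ===== CLAIM (what is proved, stated in full; the proofs are below) =====
def Claim_equal_generate_target_identity : Prop := ∀ (image_info_list : List (Int × String × Int)), Dom_generate_target_identity image_info_list → Spec_generate_target_identity image_info_list (generate_target_identity image_info_list)

-- ===== LEMMAS AND PROOFS =====

-- A's loop body equals a Dict.modify with the pair (key, path)
theorem pv_body_eq_modify (d : PySem.Dict Int (List String)) (i : Int × String × Int) :
    (if d.contains i.2.2 = false then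
        d.insert i.2.2 [i.2.1]
      else
        d.insert i.2.2 (d.getD i.2.2 [] ++ [i.2.1]))
      = d.modify i.2.2 [] (· ++ [i.2.1]) := by
  by_cases h : d.contains i.2.2
  · simp [h, PySem.Dict.modify]
  · have h' : d.contains i.2.2 = false := by simpa using h
    rw [PySem.Dict.modify, PySem.Dict.getD_of_not_contains _ _ h']
    simp [h']

theorem pv_foldl_append_eq_map {α β : Type} (f : α → β) (ks : List α) (acc : List β) :
    ks.foldl (fun out k => out ++ [f k]) acc = acc ++ ks.map f := by
  induction ks generalizing acc with
  | nil => simp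
  | cons k t ih => simp [ih, List.append_assoc]

-- ===== VERDICT (by name: the statement is the Claim_ definition above) =====
theorem generate_target_identity_spec : Claim_equal_generate_target_identity := by
  intro l _
  unfold Spec_generate_target_identity generate_target_identity generate_target_identity_alt
  have hd : (l.foldl (fun d image_info =>
      let image_path := image_info.2.1
      let identity_index := image_info.2.2
      if d.contains identity_index = false then
        d.insert identity_index [image_path]
      else
        d.insert identity_index (d.getD identity_index [] ++ [image_path])) PySem.Dict.empty)
      = (l.map (fun i => (i.2.2, i.2.1))).foldl
          (fun d p => d.modify p.1 [] (· ++ [p.2])) PySem.Dict.empty := by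
    rw [List.foldl_map]
    congr 1
    funext d i
    exact pv_body_eq_modify d i
  rw [hd]
  have hkeys : ((l.map (fun i => (i.2.2, i.2.1))).foldl
      (fun d p => d.modify p.1 [] (· ++ [p.2])) PySem.Dict.empty).keys
      = PySem.Set.ofList (l.map (fun info => info.2.2)) := by
    rw [PySem.Dict.keys_foldl_modify_key]
    simp [PySem.Set.update_nil_left, List.map_map, Function.comp_def]
  have hgetD : ∀ k : Int, ((l.map (fun i => (i.2.2, i.2.1))).foldl
      (fun d p => d.modify p.1 [] (· ++ [p.2])) PySem.Dict.empty).getD k []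
      = (l.filter (fun info => info.2.2 == k)).map (fun info => info.2.1) := by
    intro k
    rw [PySem.Dict.getD_foldl_modify_append]
    simp [List.filter_map, Function.comp_def]
  rw [pv_foldl_append_eq_map, hkeys]
  simp only [hgetD, List.nil_append]
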